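-- pv_equiv track=rewrite | github.com/rsersh/fantastic-bombastic | names.py | sort_by_surname_desc
-- ===== SOURCE A (Python) =====
-- def dedup_and_title_case_names(names):
--     """Should return a list of title cased names,
--        each name appears only once"""
--     names = list(map(lambda x: x.title(), names))
--     # probably something better to do this
--     # better way: return [x.title() for x in set(names)]
--     # alternate: return list(set(name.title() for name in names))
--     nameset = set(names)
--     return list(nameset)
--     pass
--
-- def sort_by_surname_desc(names):
--     """Returns names list sorted desc by surname"""
--     # better way: return sorted(names, key=lambda name: name.split()[1], reverse=True)
--     names = dedup_and_title_case_names(names)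
--     newlist = []
--     alphalist = []
--     for name in names:
--         first, last = name.split(' ')
--         newlist.append(last+' '+first)
--     newlist.sort(reverse=True)
--     for name in newlist:
--         last, first = name.split(' ')
--         alphalist.append(first+' '+last)
--     return alphalist
--     pass
-- ===== SOURCE B (Python) =====
-- def sort_by_surname_desc(names):
--     """Returns names list sorted desc by surname.
--
--     Insertion sort: each deduped title-cased name is inserted directly into
--     its place in a (key, name) list kept descending by the 'last first' key.
--     """
--     result = []  # list of (swapped_key, name), descending by key
--     for name in {n.title() for n in names}:
--         first, last = name.split(' ')
--         key = last + ' ' + first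
--         i = 0
--         while i < len(result) and result[i][0] >= key:
--             i += 1
--         result.insert(i, (key, name))
--     return [name for _, name in result]
-- ===== Notes on version B (the rewrite author's own statement) =====
-- stated objective: alternative
-- what changed: A's decorate-sort-undecorate (swap every deduped name to 'last first', library reverse sort, swap back) is replaced by a hand-written insertion sort that places each deduped title-cased name directly into a (key, name) list kept descending by the swapped key, so both transform passes and the library sort disappear.
import Mathlib
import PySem

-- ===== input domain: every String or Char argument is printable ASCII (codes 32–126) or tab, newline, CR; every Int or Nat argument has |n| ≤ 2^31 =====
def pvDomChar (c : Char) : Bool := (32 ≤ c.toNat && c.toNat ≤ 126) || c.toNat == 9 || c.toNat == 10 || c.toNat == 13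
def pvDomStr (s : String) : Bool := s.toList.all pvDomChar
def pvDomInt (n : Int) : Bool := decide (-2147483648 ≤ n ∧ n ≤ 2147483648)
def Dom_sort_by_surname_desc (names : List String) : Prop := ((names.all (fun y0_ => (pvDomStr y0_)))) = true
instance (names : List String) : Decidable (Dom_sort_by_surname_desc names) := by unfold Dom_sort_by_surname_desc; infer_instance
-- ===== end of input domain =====

-- B replaces A's decorate-sort-undecorate (swap every name to "last first", library sort, swap back) by a
-- hand-written insertion sort that places each deduped title-cased name straight into a descending
-- (key, name) list; same return value, a different algorithm.

-- ===== PORT A =====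
-- Python str.title(), exact on the ASCII domain (a letter is uppercased after a non-letter, lowercased
-- after a letter; non-letters pass through); ported by hand, PySem has no title primitive.
def pyTitleGo : List Char → Bool → List Char
  | [], _ => []
  | c :: cs, prevAlpha =>
    (if PySem.Chars.isalpha c then
       (if prevAlpha then PySem.Chars.lowerChar c else PySem.Chars.upperChar c)
     else c) :: pyTitleGo cs (PySem.Chars.isalpha c)

def pyTitle (s : String) : String := String.ofList (pyTitleGo s.toList false)

-- "first, last = name.split(' '); last + ' ' + first" — used by A in both of its loops, and by B to build
-- each insertion key. Any split arity other than 2 is a Python ValueError, excluded by Pre_; the ""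
-- default is never reached under Pre_.
def swapName (name : String) : String :=
  match PySem.Chars.splitOn name.toList [' '] with
  | [f, l] => String.ofList (l ++ ' ' :: f)
  | _ => ""

-- names = dedup_and_title_case_names(names); two append loops around a plain reverse sort.
-- (Python iterates list(set(...)) in hash order; the final full sort makes the result order-independent.)
def sort_by_surname_desc (names : List String) : List String :=
  let titled : PySem.Set String := PySem.Set.ofList (names.map pyTitle)
  let newlist := titled.foldl (fun acc name => acc ++ [swapName name]) []
  let sortedSwapped := PySem.List.sorted newlist (fun x => x) true
  sortedSwapped.foldl (fun acc name => acc ++ [swapName name]) []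

-- ===== PORT B =====
-- Source B's inner while/insert: walk past the pairs whose key is ≥ the new key, insert the pair there.
def insDesc (p : String × String) : List (String × String) → List (String × String)
  | [] => [p]
  | q :: qs => if p.1 ≤ q.1 then q :: insDesc p qs else p :: q :: qs

-- for each deduped title-cased name, insert (key, name) into the descending list; return the names.
def sort_by_surname_desc_alt (names : List String) : List String :=
  let result := (PySem.Set.ofList (names.map pyTitle)).foldl
    (fun acc name => insDesc (swapName name, name) acc) []
  result.map Prod.snd

-- ===== PRECONDITION & SPEC =====
-- A unpacks name.split(' ') into exactly two variables: any name whose space count is not exactly 1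
-- makes A (and B) raise ValueError — exactly those inputs are excluded.
def Pre_sort_by_surname_desc (names : List String) : Prop :=
  ∀ s ∈ names, s.toList.count ' ' = 1
instance (names : List String) : Decidable (Pre_sort_by_surname_desc names) := by
  unfold Pre_sort_by_surname_desc; infer_instance

def pvWitness_sort_by_surname_desc : List String :=
  ["ada lovelace", "john smith", "Ada Lovelace", "john zorn"]

def Spec_sort_by_surname_desc (names : List String) (out : List String) : Prop := out = sort_by_surname_desc_alt names
instance (names : List String) (out : List String) : Decidable (Spec_sort_by_surname_desc names out) := by unfold Spec_sort_by_surname_desc; infer_instance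

-- ===== CLAIM (what is proved, stated in full; the proofs are below) =====
def Claim_equal_sort_by_surname_desc : Prop := ∀ (names : List String), Dom_sort_by_surname_desc names → Pre_sort_by_surname_desc names → Spec_sort_by_surname_desc names (sort_by_surname_desc names)

-- ===== LEMMAS AND PROOFS =====

theorem char_le_toNat {a b : Char} : a ≤ b ↔ a.toNat ≤ b.toNat := by
  rw [Char.le_def]; exact UInt32.le_iff_toNat_le

theorem toNat_ofNat_valid {n : Nat} (h : n < 55296) : (Char.ofNat n).toNat = n := by
  rw [Char.toNat_ofNat, if_pos (Or.inl h)]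

theorem alpha_bounds {c : Char} (h : PySem.Chars.isalpha c = true) :
    (65 ≤ c.toNat ∧ c.toNat ≤ 90) ∨ (97 ≤ c.toNat ∧ c.toNat ≤ 122) := by
  simp only [PySem.Chars.isalpha, PySem.Chars.isupper, PySem.Chars.islower, Bool.or_eq_true,
    Bool.and_eq_true, decide_eq_true_eq, char_le_toNat] at h
  have hA : ('A' : Char).toNat = 65 := rfl
  have hZ : ('Z' : Char).toNat = 90 := rfl
  have ha : ('a' : Char).toNat = 97 := rfl
  have hz : ('z' : Char).toNat = 122 := rfl
  omega

theorem title_char_ne_space {c : Char} (h : PySem.Chars.isalpha c = true) :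
    PySem.Chars.lowerChar c ≠ ' ' ∧ PySem.Chars.upperChar c ≠ ' ' := by
  have hb := alpha_bounds h
  have hA : ('A' : Char).toNat = 65 := rfl
  have hZ : ('Z' : Char).toNat = 90 := rfl
  have ha : ('a' : Char).toNat = 97 := rfl
  have hz : ('z' : Char).toNat = 122 := rfl
  have hsp : (' ' : Char).toNat = 32 := rfl
  constructor <;>
    simp only [PySem.Chars.lowerChar, PySem.Chars.upperChar, PySem.Chars.isupper,
      PySem.Chars.islower, Bool.and_eq_true, decide_eq_true_eq, char_le_toNat] <;>
    split <;> intro hc <;> have h2 := congrArg Char.toNat hc <;>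
    [ rw [toNat_ofNat_valid (by omega)] at h2; skip; rw [toNat_ofNat_valid (by omega)] at h2; skip ] <;>
    omega

-- title() maps a character to ' ' exactly where the original character is ' ', so space counts survive.
theorem count_space_pyTitleGo (cs : List Char) (b : Bool) :
    (pyTitleGo cs b).count ' ' = cs.count ' ' := by
  induction cs generalizing b with
  | nil => rfl
  | cons c rest ih =>
    by_cases ha : PySem.Chars.isalpha c = true
    · have hsp : c ≠ ' ' := by
        intro h; subst h; exact absurd ha (by decide)
      have h1 := title_char_ne_space ha
      simp only [pyTitleGo, ha, if_true]
      by_cases hb : b <;>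
        simp [hb, ih, h1.1, h1.2, hsp]
    · simp [pyTitleGo, ha, List.count_cons, ih]

theorem count_space_pyTitle (s : String) :
    (pyTitle s).toList.count ' ' = s.toList.count ' ' := by
  simp [pyTitle, count_space_pyTitleGo]

-- a space-free suffix: splitOn's scanner just accumulates it
theorem isPrefixOf_space_false {c : Char} (hc : c ≠ ' ') (t : List Char) :
    List.isPrefixOf [' '] (c :: t) = false := by
  simp [List.isPrefixOf]; exact fun h => absurd h.symm hc

theorem go_nosep (l : List Char) (hl : ' ' ∉ l) :
    ∀ (fuel : Nat) (cur : List Char) (acc : List (List Char)), l.length ≤ fuel →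
      PySem.Chars.splitOn.go [' '] fuel l cur acc = ((cur.reverse ++ l) :: acc).reverse := by
  induction l with
  | nil =>
    intro fuel cur acc _
    cases fuel <;> simp [PySem.Chars.splitOn.go]
  | cons c rest ih =>
    intro fuel cur acc hf
    cases fuel with
    | zero => simp at hf
    | succ k =>
      have hc : c ≠ ' ' := fun h => hl (h ▸ List.mem_cons_self ..)
      have hpre := isPrefixOf_space_false hc rest
      rw [PySem.Chars.splitOn.go]
      simp only [hpre]
      rw [ih (fun h => hl (List.mem_cons_of_mem _ h)) k (c :: cur) acc (by simpa using hf)]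
      simp

theorem go_two (f l : List Char) (hf : ' ' ∉ f) (hl : ' ' ∉ l) :
    ∀ (fuel : Nat) (cur : List Char) (acc : List (List Char)),
      f.length + l.length + 1 ≤ fuel →
      PySem.Chars.splitOn.go [' '] fuel (f ++ ' ' :: l) cur acc
        = acc.reverse ++ [cur.reverse ++ f, l] := by
  induction f with
  | nil =>
    intro fuel cur acc hfu
    cases fuel with
    | zero => simp at hfu
    | succ k =>
      have hpre : List.isPrefixOf [' '] (' ' :: l) = true := by simp [List.isPrefixOf]
      rw [List.nil_append, PySem.Chars.splitOn.go]
      simp only [hpre, if_true, List.length_cons, List.length_nil, List.drop_succ_cons,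
        List.drop_zero]
      rw [go_nosep l hl k [] (cur.reverse :: acc) (by simpa using hfu)]
      simp
  | cons c rest ih =>
    intro fuel cur acc hfu
    cases fuel with
    | zero => simp at hfu
    | succ k =>
      have hc : c ≠ ' ' := fun h => hf (h ▸ List.mem_cons_self ..)
      have hpre := isPrefixOf_space_false hc (rest ++ ' ' :: l)
      rw [List.cons_append, PySem.Chars.splitOn.go]
      simp only [hpre]
      rw [ih (fun h => hf (List.mem_cons_of_mem _ h)) k (c :: cur) acc (by simp at hfu ⊢; omega)]
      simp

theorem splitOn_two {f l : List Char} (hf : ' ' ∉ f) (hl : ' ' ∉ l) :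
    PySem.Chars.splitOn (f ++ ' ' :: l) [' '] = [f, l] := by
  rw [PySem.Chars.splitOn]
  rw [go_two f l hf hl _ [] [] (by simp)]
  simp

-- one space in cs ⇒ cs = f ++ ' ' :: l with both halves space-free
theorem decomp_of_count_one {cs : List Char} (h : cs.count ' ' = 1) :
    ∃ f l, cs = f ++ ' ' :: l ∧ ' ' ∉ f ∧ ' ' ∉ l := by
  induction cs with
  | nil => simp at h
  | cons c rest ih =>
    by_cases hc : c = ' '
    · subst hc
      have h0 : rest.count ' ' = 0 := by simpa using h
      exact ⟨[], rest, by simp, by simp, by simpa [List.count_eq_zero] using h0⟩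
    · have h1 : rest.count ' ' = 1 := by simpa [List.count_cons, hc] using h
      obtain ⟨f, l, hdec, hf, hl⟩ := ih h1
      exact ⟨c :: f, l, by simp [hdec],
        by simp [hf]; exact fun h => hc h.symm, hl⟩

-- a well-formed (one-space) name: swapName really swaps, and is an involution
theorem swapName_decomp {f l : List Char} (hf : ' ' ∉ f) (hl : ' ' ∉ l) :
    swapName (String.ofList (f ++ ' ' :: l)) = String.ofList (l ++ ' ' :: f) := by
  rw [swapName]
  simp only [String.toList_ofList]
  rw [splitOn_two hf hl]

theorem swapName_swapName {x : String} (h : x.toList.count ' ' = 1) :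
    swapName (swapName x) = x := by
  obtain ⟨f, l, hdec, hf, hl⟩ := decomp_of_count_one h
  have hx : x = String.ofList (f ++ ' ' :: l) := by
    rw [← hdec, String.ofList_toList]
  rw [hx, swapName_decomp hf hl, swapName_decomp hl hf]

theorem swapName_inj {x y : String} (hx : x.toList.count ' ' = 1)
    (hy : y.toList.count ' ' = 1) (h : swapName x = swapName y) : x = y := by
  rw [← swapName_swapName hx, ← swapName_swapName hy, h]

-- every name the sorts see is well formed
theorem wf_of_mem_set {names : List String} (hp : Pre_sort_by_surname_desc names)
    {x : String} (hx : x ∈ PySem.Set.ofList (names.map pyTitle)) :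
    x.toList.count ' ' = 1 := by
  rw [PySem.Set.mem_ofList] at hx
  obtain ⟨s, hs, rfl⟩ := List.mem_map.mp hx
  rw [count_space_pyTitle]
  exact hp s hs

-- ===== A-side: A's three passes compute the keyed reverse sort of the deduped set =====
theorem sort_swap_comm {names : List String} (hp : Pre_sort_by_surname_desc names) :
    PySem.List.sorted
        ((PySem.Set.ofList (names.map pyTitle)).map swapName) (fun x => x) true
      = (PySem.List.sorted (PySem.Set.ofList (names.map pyTitle)) swapName true).map swapName := by
  set ds := PySem.Set.ofList (names.map pyTitle) with hds
  set L := PySem.List.sorted ds swapName true with hL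
  have hperm : L.Perm ds := PySem.List.sorted_perm ds swapName true
  have hnodup : L.Nodup := (hperm.symm.nodup_iff).mp (PySem.Set.nodup_ofList _)
  have hmem : ∀ x ∈ L, x.toList.count ' ' = 1 := fun x hx =>
    wf_of_mem_set hp (hperm.mem_iff.mp hx)
  have hpair : L.Pairwise (fun a b => swapName b ≤ swapName a) :=
    PySem.List.sorted_pairwise_rev ds swapName
  have hstrict : L.Pairwise (fun a b => swapName b < swapName a) := by
    have hne : L.Pairwise (fun a b : String => a ≠ b) := hnodup
    have := List.Pairwise.and hpair hne
    refine this.imp_of_mem ?_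
    intro a b ha hb hab
    exact lt_of_le_of_ne hab.1
      (fun he => hab.2 (swapName_inj (hmem b hb) (hmem a ha) he).symm)
  exact PySem.List.sorted_rev_eq_of_perm_of_pairwise_gt _ _ _
    (hperm.map swapName) ((List.pairwise_map).mpr hstrict)

theorem a_eq_sorted {names : List String} (hp : Pre_sort_by_surname_desc names) :
    sort_by_surname_desc names
      = PySem.List.sorted (PySem.Set.ofList (names.map pyTitle)) swapName true := by
  unfold sort_by_surname_desc
  simp only [PySem.List.foldl_append_singleton_eq_map, List.nil_append]
  rw [sort_swap_comm hp, List.map_map]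
  have hperm := PySem.List.sorted_perm (PySem.Set.ofList (names.map pyTitle)) swapName true
  have hmapid : List.map (swapName ∘ swapName)
      (PySem.List.sorted (PySem.Set.ofList (names.map pyTitle)) swapName true)
      = List.map id (PySem.List.sorted (PySem.Set.ofList (names.map pyTitle)) swapName true) :=
    List.map_congr_left (fun x hx =>
      swapName_swapName (wf_of_mem_set hp (hperm.mem_iff.mp hx)))
  rw [hmapid, List.map_id]

-- ===== B-side: the insertion fold builds a descending permutation of the keyed set =====
theorem insDesc_perm (p : String × String) (l : List (String × String)) :
    (insDesc p l).Perm (p :: l) := by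
  induction l with
  | nil => rfl
  | cons q qs ih =>
    by_cases h : p.1 ≤ q.1
    · simp only [insDesc, h, if_true]
      exact (ih.cons q).trans (List.Perm.swap p q qs)
    · simp [insDesc, h]

theorem insDesc_pairwise {p : String × String} {l : List (String × String)}
    (h : l.Pairwise (fun a b => b.1 ≤ a.1)) :
    (insDesc p l).Pairwise (fun a b : String × String => b.1 ≤ a.1) := by
  induction l with
  | nil => simp [insDesc]
  | cons q qs ih =>
    rw [List.pairwise_cons] at h
    by_cases hle : p.1 ≤ q.1
    · simp only [insDesc, hle, if_true]
      rw [List.pairwise_cons]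
      refine ⟨fun z hz => ?_, ih h.2⟩
      rcases List.mem_cons.mp ((insDesc_perm p qs).mem_iff.mp hz) with hz | hz
      · subst hz; exact hle
      · exact h.1 z hz
    · simp only [insDesc, hle, if_false]
      rw [List.pairwise_cons]
      refine ⟨fun z hz => ?_, List.pairwise_cons.mpr h⟩
      rcases List.mem_cons.mp hz with hz | hz
      · subst hz; exact le_of_not_ge hle
      · exact (h.1 z hz).trans (le_of_not_ge hle)

theorem foldl_insDesc_perm (f : String → String × String) (l : List String) :
    ∀ acc, (l.foldl (fun acc n => insDesc (f n) acc) acc).Perm (l.map f ++ acc) := by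
  induction l with
  | nil => intro acc; simp
  | cons n ns ih =>
    intro acc
    have h1 : ((n :: ns).foldl (fun acc n => insDesc (f n) acc) acc).Perm
        (ns.map f ++ insDesc (f n) acc) := ih _
    have h2 : (ns.map f ++ insDesc (f n) acc).Perm (ns.map f ++ (f n :: acc)) :=
      List.Perm.append_left _ (insDesc_perm _ _)
    have h3 : (ns.map f ++ (f n :: acc)).Perm (f n :: (ns.map f ++ acc)) := List.perm_middle
    simpa using (h1.trans h2).trans h3

theorem foldl_insDesc_pairwise (f : String → String × String) (l : List String) :
    ∀ acc, acc.Pairwise (fun a b : String × String => b.1 ≤ a.1) →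
      (l.foldl (fun acc n => insDesc (f n) acc) acc).Pairwise
        (fun a b : String × String => b.1 ≤ a.1) := by
  induction l with
  | nil => intro acc h; exact h
  | cons n ns ih => intro acc h; exact ih _ (insDesc_pairwise h)

theorem b_eq_sorted {names : List String} (hp : Pre_sort_by_surname_desc names) :
    sort_by_surname_desc_alt names
      = PySem.List.sorted (PySem.Set.ofList (names.map pyTitle)) swapName true := by
  unfold sort_by_surname_desc_alt
  set ds := PySem.Set.ofList (names.map pyTitle) with hds
  set f : String → String × String := fun n => (swapName n, n) with hf
  set L := (ds : List String).foldl (fun acc n => insDesc (f n) acc) [] with hL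
  have hLperm : L.Perm (ds.map f) := by
    simpa using foldl_insDesc_perm f ds []
  have hsnd : (L.map Prod.snd).Perm ds := by
    refine (hLperm.map Prod.snd).trans ?_
    rw [List.map_map]
    refine List.Perm.of_eq ?_
    have hid : (Prod.snd ∘ fun n : String => (swapName n, n)) = id := rfl
    rw [hf, hid, List.map_id]
  have hfst : ∀ p ∈ L, p.1 = swapName p.2 := by
    intro p hp'
    have := hLperm.mem_iff.mp hp'
    obtain ⟨n, _, rfl⟩ := List.mem_map.mp this
    rfl
  have hpairL : L.Pairwise (fun a b : String × String => b.1 ≤ a.1) :=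
    foldl_insDesc_pairwise f ds [] (by simp)
  have hpair2 : (L.map Prod.snd).Pairwise (fun a b => swapName b ≤ swapName a) := by
    rw [List.pairwise_map]
    refine hpairL.imp_of_mem ?_
    intro a b ha hb hab
    rw [← hfst a ha, ← hfst b hb]
    exact hab
  have hnodup : (L.map Prod.snd).Nodup :=
    (hsnd.nodup_iff).mpr (PySem.Set.nodup_ofList _)
  have hmem : ∀ x ∈ L.map Prod.snd, x.toList.count ' ' = 1 := fun x hx =>
    wf_of_mem_set hp (hsnd.mem_iff.mp hx)
  have hstrict : (L.map Prod.snd).Pairwise (fun a b => swapName b < swapName a) := by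
    have hne : (L.map Prod.snd).Pairwise (fun a b : String => a ≠ b) := hnodup
    have := List.Pairwise.and hpair2 hne
    refine this.imp_of_mem ?_
    intro a b ha hb hab
    exact lt_of_le_of_ne hab.1
      (fun he => hab.2 (swapName_inj (hmem b hb) (hmem a ha) he).symm)
  exact (PySem.List.sorted_rev_eq_of_perm_of_pairwise_gt _ _ _ hsnd hstrict).symm

-- ===== VERDICT (by name: the statement is the Claim_ definition above) =====
theorem sort_by_surname_desc_spec : Claim_equal_sort_by_surname_desc := by
  intro names _ hp
  unfold Spec_sort_by_surname_desc
  rw [a_eq_sorted hp, b_eq_sorted hp]
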